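-- pv_equiv track=rewrite | github.com/manwar/perlweeklychallenge-club | challenge-202/lubos-kolouch/python/ch-2.py | widest_valley
-- ===== SOURCE A (Python) =====
-- from collections.abc import Sequence
--
-- def widest_valley(profile: Sequence[int]) -> list[int]:
--     """Return the leftmost widest valley.
--
--     A valley is a subarray that is non-increasing then non-decreasing.
--     """
--     n = len(profile)
--     if n == 0:
--         return []
--
--     left_start = [0] * n
--     for i in range(1, n):
--         left_start[i] = left_start[i - 1] if profile[i - 1] >= profile[i] else i
--
--     right_end = [0] * n
--     right_end[n - 1] = n - 1
--     for i in range(n - 2, -1, -1):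
--         right_end[i] = right_end[i + 1] if profile[i] <= profile[i + 1] else i
--
--     best_l, best_r, best_len = 0, 0, 1
--     for p in range(n):
--         l = left_start[p]
--         r = right_end[p]
--         length = r - l + 1
--         if length > best_len or (length == best_len and l < best_l):
--             best_l, best_r, best_len = l, r, length
--
--     return list(profile[best_l : best_r + 1])
-- ===== SOURCE B (Python) =====
-- def widest_valley(profile):
--     """Return the leftmost widest valley in a single left-to-right pass.
--
--     A valley is a subarray that is non-increasing then non-decreasing.
--     Maximal valleys close exactly at strict drops and at the last index;
--     strictly longer wins, ties keep the earlier (leftmost) valley.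
--     """
--     xs = list(profile)
--     n = len(xs)
--     if n == 0:
--         return []
--     best_l, best_r = 0, 0
--     valley = 0  # start of the maximal valley currently being traversed
--     slope = 0   # start of the current non-increasing run
--     for i in range(1, n):
--         if xs[i - 1] > xs[i]:
--             # the valley [valley, i-1] closes at the peak i-1
--             if (i - 1) - valley > best_r - best_l or \
--                     ((i - 1) - valley == best_r - best_l and valley < best_l):
--                 best_l, best_r = valley, i - 1
--             valley = slope
--         elif xs[i - 1] < xs[i]:
--             slope = i
--     if (n - 1) - valley > best_r - best_l or \
--             ((n - 1) - valley == best_r - best_l and valley < best_l):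
--         best_l, best_r = valley, n - 1
--     return xs[best_l : best_r + 1]
-- ===== Notes on version B (the rewrite author's own statement) =====
-- stated objective: simpler
-- what changed: Replaces A's three passes (building left_start and right_end index arrays, then scanning all candidate pairs) by a single left-to-right pass with O(1) extra state that closes a maximal valley at each strict drop and at the last index, keeping the leftmost widest one.
import Mathlib
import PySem

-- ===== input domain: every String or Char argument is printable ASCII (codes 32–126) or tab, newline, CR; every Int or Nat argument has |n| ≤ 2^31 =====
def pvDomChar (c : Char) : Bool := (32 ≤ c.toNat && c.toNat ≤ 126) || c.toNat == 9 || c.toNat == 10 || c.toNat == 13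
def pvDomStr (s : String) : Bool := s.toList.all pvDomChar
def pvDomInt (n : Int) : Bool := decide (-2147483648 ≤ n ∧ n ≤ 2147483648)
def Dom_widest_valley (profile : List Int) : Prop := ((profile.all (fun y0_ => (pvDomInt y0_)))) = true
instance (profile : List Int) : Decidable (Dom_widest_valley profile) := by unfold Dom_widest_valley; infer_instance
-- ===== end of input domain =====

-- B replaces A's three passes (two index arrays plus a scan) by one left-to-right pass
-- that closes a maximal valley at each strict drop and at the last index (objective: simpler, one pass, O(1) extra space).

-- ===== PORT A =====
def widest_valley (profile : List Int) : List Int :=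
  let n : Int := PySem.List.len profile
  if n = 0 then []
  else
    let left_start : List Int :=
      (PySem.List.pyRange 1 n 1).foldl (fun ls i =>
        PySem.List.pySetD ls i
          (if PySem.List.pyGetD profile (i - 1) 0 ≥ PySem.List.pyGetD profile i 0 then
            PySem.List.pyGetD ls (i - 1) 0
           else i)) (List.replicate n.toNat 0)
    let right_end0 : List Int :=
      PySem.List.pySetD (List.replicate n.toNat 0) (n - 1) (n - 1)
    let right_end : List Int :=
      (PySem.List.pyRange (n - 2) (-1) (-1)).foldl (fun re i =>
        PySem.List.pySetD re i
          (if PySem.List.pyGetD profile i 0 ≤ PySem.List.pyGetD profile (i + 1) 0 then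
            PySem.List.pyGetD re (i + 1) 0
           else i)) right_end0
    let best : Int × Int × Int :=
      (PySem.List.pyRange 0 n 1).foldl (fun b p =>
        let l := PySem.List.pyGetD left_start p 0
        let r := PySem.List.pyGetD right_end p 0
        let length := r - l + 1
        if length > b.2.2 ∨ (length = b.2.2 ∧ l < b.1) then (l, r, length) else b)
        (0, 0, 1)
    PySem.List.slice profile (some best.1) (some (best.2.1 + 1))

-- ===== PORT B =====
def widest_valley_alt (profile : List Int) : List Int :=
  let n : Int := PySem.List.len profile
  if n = 0 then []
  else
    let st : Int × Int × Int × Int :=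
      (PySem.List.pyRange 1 n 1).foldl (fun s i =>
        if PySem.List.pyGetD profile (i - 1) 0 > PySem.List.pyGetD profile i 0 then
          let bb : Int × Int :=
            if (i - 1) - s.2.2.1 > s.2.1 - s.1 ∨ ((i - 1) - s.2.2.1 = s.2.1 - s.1 ∧ s.2.2.1 < s.1)
            then (s.2.2.1, i - 1) else (s.1, s.2.1)
          (bb.1, bb.2, s.2.2.2, s.2.2.2)
        else if PySem.List.pyGetD profile (i - 1) 0 < PySem.List.pyGetD profile i 0 then
          (s.1, s.2.1, s.2.2.1, i)
        else s) (0, 0, 0, 0)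
    let bb : Int × Int :=
      if (n - 1) - st.2.2.1 > st.2.1 - st.1 ∨ ((n - 1) - st.2.2.1 = st.2.1 - st.1 ∧ st.2.2.1 < st.1)
      then (st.2.2.1, n - 1) else (st.1, st.2.1)
    PySem.List.slice profile (some bb.1) (some (bb.2 + 1))

-- ===== PRECONDITION & SPEC =====
def Spec_widest_valley (profile : List Int) (out : List Int) : Prop := out = widest_valley_alt profile
instance (profile : List Int) (out : List Int) : Decidable (Spec_widest_valley profile out) := by unfold Spec_widest_valley; infer_instance

-- ===== CLAIM (what is proved, stated in full; the proofs are below) =====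
def Claim_equal_widest_valley : Prop := ∀ (profile : List Int), Dom_widest_valley profile → Spec_widest_valley profile (widest_valley profile)

-- ===== LEMMAS AND PROOFS =====

-- functional versions of A's arrays: pvLs = left_start, pvCl = right_end
def pvLs (xs : List Int) : Nat → Nat
  | 0 => 0
  | i + 1 => if xs.getD i 0 ≥ xs.getD (i + 1) 0 then pvLs xs i else i + 1

def pvCl (xs : List Int) (i : Nat) : Nat :=
  if h : i + 1 < xs.length then
    (if xs.getD i 0 ≤ xs.getD (i + 1) 0 then pvCl xs (i + 1) else i)
  else i
termination_by xs.length - i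

-- start of the maximal valley currently open at index i (B's `valley` variable)
def pvV (xs : List Int) : Nat → Nat
  | 0 => 0
  | i + 1 => if xs.getD i 0 > xs.getD (i + 1) 0 then pvLs xs i else pvV xs i

-- A's best-candidate update step
def pvUpd (b : Int × Int × Int) (l r : Int) : Int × Int × Int :=
  if r - l + 1 > b.2.2 ∨ (r - l + 1 = b.2.2 ∧ l < b.1) then (l, r, r - l + 1) else b

-- A's selection loop over the first t candidates, in functional form
def pvA (xs : List Int) (t : Nat) : Int × Int × Int :=
  (List.range t).foldl (fun b p => pvUpd b ((pvLs xs p : Nat) : Int) ((pvCl xs p : Nat) : Int)) (0, 0, 1)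

-- B's pair update closing a valley at right end r
def pvBB (r : Int) (s : Int × Int × Int × Int) : Int × Int :=
  if r - s.2.2.1 > s.2.1 - s.1 ∨ (r - s.2.2.1 = s.2.1 - s.1 ∧ s.2.2.1 < s.1)
  then (s.2.2.1, r) else (s.1, s.2.1)

-- B's loop body at index m+1, in functional form
def pvBstep (xs : List Int) (m : Nat) (s : Int × Int × Int × Int) : Int × Int × Int × Int :=
  if xs.getD m 0 > xs.getD (m + 1) 0 then
    ((pvBB ((m : Nat) : Int) s).1, (pvBB ((m : Nat) : Int) s).2, s.2.2.2, s.2.2.2)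
  else if xs.getD m 0 < xs.getD (m + 1) 0 then
    (s.1, s.2.1, s.2.2.1, ((m + 1 : Nat) : Int))
  else s

-- B's loop state after processing indices 1..m
def pvB (xs : List Int) : Nat → Int × Int × Int × Int
  | 0 => (0, 0, 0, 0)
  | m + 1 => pvBstep xs m (pvB xs m)

-- the loop bodies of the folds of port A and port B, as named functions
def pvStepA (xs : List Int) (ls : List Int) (i : Int) : List Int :=
  PySem.List.pySetD ls i
    (if PySem.List.pyGetD xs (i - 1) 0 ≥ PySem.List.pyGetD xs i 0 then
      PySem.List.pyGetD ls (i - 1) 0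
     else i)

def pvStepR (xs : List Int) (re : List Int) (i : Int) : List Int :=
  PySem.List.pySetD re i
    (if PySem.List.pyGetD xs i 0 ≤ PySem.List.pyGetD xs (i + 1) 0 then
      PySem.List.pyGetD re (i + 1) 0
     else i)

def pvStepB (xs : List Int) (s : Int × Int × Int × Int) (i : Int) : Int × Int × Int × Int :=
  if PySem.List.pyGetD xs (i - 1) 0 > PySem.List.pyGetD xs i 0 then
    let bb : Int × Int :=
      if (i - 1) - s.2.2.1 > s.2.1 - s.1 ∨ ((i - 1) - s.2.2.1 = s.2.1 - s.1 ∧ s.2.2.1 < s.1)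
      then (s.2.2.1, i - 1) else (s.1, s.2.1)
    (bb.1, bb.2, s.2.2.2, s.2.2.2)
  else if PySem.List.pyGetD xs (i - 1) 0 < PySem.List.pyGetD xs i 0 then
    (s.1, s.2.1, s.2.2.1, i)
  else s

lemma pvCast_ite (c : Prop) [Decidable c] (a b : Nat) :
    ((if c then a else b : Nat) : Int) = if c then (a : Int) else (b : Int) :=
  apply_ite _ c a b

lemma pvLs_succ (xs : List Int) (m : Nat) :
    pvLs xs (m + 1) = if xs.getD m 0 ≥ xs.getD (m + 1) 0 then pvLs xs m else m + 1 := by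
  conv_lhs => rw [pvLs]

lemma pvV_succ (xs : List Int) (m : Nat) :
    pvV xs (m + 1) = if xs.getD m 0 > xs.getD (m + 1) 0 then pvLs xs m else pvV xs m := by
  conv_lhs => rw [pvV]

lemma pvCl_last (xs : List Int) (i : Nat) (h : ¬ i + 1 < xs.length) : pvCl xs i = i := by
  unfold pvCl; rw [dif_neg h]

lemma pvCl_step (xs : List Int) (i : Nat) (h : i + 1 < xs.length) :
    pvCl xs i = if xs.getD i 0 ≤ xs.getD (i + 1) 0 then pvCl xs (i + 1) else i := by
  conv_lhs => rw [pvCl]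
  rw [dif_pos h]

lemma pvLs_le (xs : List Int) : ∀ m, pvLs xs m ≤ m := by
  intro m; induction m with
  | zero => simp [pvLs]
  | succ m ih => rw [pvLs_succ]; split <;> omega

lemma pvV_le_pvLs (xs : List Int) : ∀ m, pvV xs m ≤ pvLs xs m := by
  intro m; induction m with
  | zero => simp [pvV, pvLs]
  | succ m ih =>
    have h1 := pvLs_le xs m
    by_cases h : xs.getD m 0 > xs.getD (m + 1) 0
    · have hge : xs.getD m 0 ≥ xs.getD (m + 1) 0 := le_of_lt h
      rw [pvV_succ, pvLs_succ, if_pos h, if_pos hge]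
    · rw [pvV_succ, pvLs_succ, if_neg h]
      split <;> omega

lemma pvV_le (xs : List Int) (m : Nat) : pvV xs m ≤ m :=
  le_trans (pvV_le_pvLs xs m) (pvLs_le xs m)

lemma pvGetD_set_self (L : List Int) (i : Nat) (v : Int) (h : i < L.length) :
    (L.set i v).getD i 0 = v := by
  simp [List.getD_eq_getElem?_getD, List.getElem?_set_self h]

lemma pvGetD_set_ne (L : List Int) (i j : Nat) (v : Int) (h : i ≠ j) :
    (L.set i v).getD j 0 = L.getD j 0 := by
  simp [List.getD_eq_getElem?_getD, List.getElem?_set_ne h]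

lemma pvUpd_absorb (B : Int × Int × Int) (l₀ l r : Int) (h : l₀ ≤ l) :
    pvUpd (pvUpd B l₀ r) l r = pvUpd B l₀ r := by
  unfold pvUpd
  split_ifs with h1 h2 h3
  · exfalso; dsimp only at h2; omega
  · rfl
  · exfalso; omega
  · rfl

-- the pair update pvBB agrees with pvUpd on triples carrying len = r - l + 1
lemma pvUpd_pvBB (s : Int × Int × Int × Int) (r : Int) :
    pvUpd (s.1, s.2.1, s.2.1 - s.1 + 1) s.2.2.1 r
      = ((pvBB r s).1, (pvBB r s).2, (pvBB r s).2 - (pvBB r s).1 + 1) := by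
  unfold pvUpd pvBB
  dsimp only
  split_ifs with h1 h2 <;> first | rfl | (exfalso; omega)

lemma pvA_succ (xs : List Int) (t : Nat) :
    pvA xs (t + 1) = pvUpd (pvA xs t) ((pvLs xs t : Nat) : Int) ((pvCl xs t : Nat) : Int) := by
  unfold pvA
  rw [List.range_succ, List.foldl_append]
  rfl

-- A's first loop builds exactly the table of pvLs values
lemma pvLS_inv (xs : List Int) : ∀ k, k ≤ xs.length →
    (List.foldl (pvStepA xs) (List.replicate xs.length 0) (PySem.List.pyRange 1 (k : Int))).length = xs.length ∧
    ∀ p, p < k →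
      (List.foldl (pvStepA xs) (List.replicate xs.length 0) (PySem.List.pyRange 1 (k : Int))).getD p 0
        = ((pvLs xs p : Nat) : Int) := by
  intro k
  induction k with
  | zero =>
    intro _
    rw [PySem.List.pyRange_one_eq_nil (by norm_num)]
    exact ⟨by simp, fun p hp => absurd hp (by omega)⟩
  | succ k ih =>
    intro hk
    rcases Nat.eq_zero_or_pos k with hk0 | hk1
    · subst hk0
      rw [show ((0 + 1 : Nat) : Int) = (1 : Int) by norm_num,
          PySem.List.pyRange_one_eq_nil (by norm_num), List.foldl_nil]
      refine ⟨by simp, ?_⟩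
      intro p hp
      have hp0 : p = 0 := by omega
      subst hp0
      rw [List.getD_replicate _ (by omega)]
      rfl
    · obtain ⟨hL, hP⟩ := ih (by omega)
      have hsplit : PySem.List.pyRange 1 ((k + 1 : Nat) : Int) =
          PySem.List.pyRange 1 (k : Int) ++ [(k : Int)] := by
        rw [show ((k + 1 : Nat) : Int) = (k : Int) + 1 by push_cast; ring]
        exact PySem.List.pyRange_one_succ_right (by exact_mod_cast hk1)
      rw [hsplit, List.foldl_append]
      set L := List.foldl (pvStepA xs) (List.replicate xs.length 0) (PySem.List.pyRange 1 (k : Int)) with hLdef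
      obtain ⟨j, rfl⟩ : ∃ j, k = j + 1 := ⟨k - 1, by omega⟩
      have hstep : pvStepA xs L ((j + 1 : Nat) : Int) = L.set (j + 1) ((pvLs xs (j + 1) : Nat) : Int) := by
        unfold pvStepA
        rw [show ((j + 1 : Nat) : Int) - 1 = ((j : Nat) : Int) by push_cast; ring]
        rw [PySem.List.pyGetD_natCast, PySem.List.pyGetD_natCast, PySem.List.pyGetD_natCast,
            PySem.List.pySetD_natCast]
        rw [hP j (by omega)]
        congr 1
        rw [pvLs_succ, pvCast_ite]
      rw [List.foldl_cons, List.foldl_nil, hstep]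
      refine ⟨by simpa using hL, ?_⟩
      intro p hp
      rcases Nat.lt_succ_iff_lt_or_eq.mp hp with hlt | heq
      · rw [pvGetD_set_ne L (j + 1) p _ (by omega)]
        exact hP p hlt
      · subst heq
        exact pvGetD_set_self L _ _ (by omega)

-- A's second loop builds exactly the table of pvCl values
lemma pvRE_inv (xs : List Int) : ∀ (j : Nat) (L : List Int), j + 1 < xs.length →
    L.length = xs.length →
    (∀ p, j < p → p < xs.length → L.getD p 0 = ((pvCl xs p : Nat) : Int)) →
    (List.foldl (pvStepR xs) L (PySem.List.pyRange (j : Int) (-1) (-1))).length = xs.length ∧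
    ∀ p, p < xs.length →
      (List.foldl (pvStepR xs) L (PySem.List.pyRange (j : Int) (-1) (-1))).getD p 0
        = ((pvCl xs p : Nat) : Int) := by
  intro j
  induction j with
  | zero =>
    intro L hj hL hP
    rw [show ((0 : Nat) : Int) = (0 : Int) by norm_num,
        PySem.List.pyRange_neg_one_cons (by norm_num), show (0 : Int) - 1 = -1 by ring,
        PySem.List.pyRange_neg_one_eq_nil (by norm_num), List.foldl_cons, List.foldl_nil]
    have hstep : pvStepR xs L 0 = L.set 0 ((pvCl xs 0 : Nat) : Int) := by
      unfold pvStepR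
      rw [show (0 : Int) + 1 = ((1 : Nat) : Int) by norm_num]
      rw [show (0 : Int) = ((0 : Nat) : Int) by norm_num]
      rw [PySem.List.pyGetD_natCast, PySem.List.pyGetD_natCast, PySem.List.pyGetD_natCast,
          PySem.List.pySetD_natCast]
      simp only [Nat.cast_zero]
      rw [hP 1 (by omega) (by omega)]
      congr 1
      rw [pvCl_step xs 0 (by omega), pvCast_ite]
      norm_num
    rw [hstep]
    refine ⟨by simpa using hL, ?_⟩
    intro p hp
    rcases Nat.eq_zero_or_pos p with rfl | hppos
    · exact pvGetD_set_self L 0 _ (by omega)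
    · rw [pvGetD_set_ne L 0 p _ (by omega)]
      exact hP p (by omega) hp
  | succ j ih =>
    intro L hj hL hP
    rw [PySem.List.pyRange_neg_one_cons (by exact_mod_cast (by omega : (-1 : Int) < ((j + 1 : Nat) : Int))),
        show ((j + 1 : Nat) : Int) - 1 = ((j : Nat) : Int) by push_cast; ring, List.foldl_cons]
    have hstep : pvStepR xs L ((j + 1 : Nat) : Int) = L.set (j + 1) ((pvCl xs (j + 1) : Nat) : Int) := by
      unfold pvStepR
      rw [show ((j + 1 : Nat) : Int) + 1 = ((j + 2 : Nat) : Int) by push_cast; ring]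
      rw [PySem.List.pyGetD_natCast, PySem.List.pyGetD_natCast, PySem.List.pyGetD_natCast,
          PySem.List.pySetD_natCast]
      rw [hP (j + 2) (by omega) (by omega)]
      congr 1
      rw [pvCl_step xs (j + 1) (by omega), pvCast_ite]
    rw [hstep]
    refine ih (L.set (j + 1) ((pvCl xs (j + 1) : Nat) : Int)) (by omega) (by simpa using hL) ?_
    intro p hpj hpn
    rcases Nat.lt_or_ge (j + 1) p with hlt | hge
    · rw [pvGetD_set_ne L (j + 1) p _ (by omega)]
      exact hP p (by omega) hpn
    · have hpe : p = j + 1 := by omega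
      subst hpe
      exact pvGetD_set_self L (j + 1) _ (by omega)

-- B's loop is pvB
lemma pvB_bridge (xs : List Int) : ∀ M,
    List.foldl (pvStepB xs) (0, 0, 0, 0) ((List.range M).map (fun (k : Nat) => 1 + (k : Int))) = pvB xs M := by
  intro M
  induction M with
  | zero => rfl
  | succ M ih =>
    rw [List.range_succ, List.map_append, List.foldl_append, ih, List.map_singleton,
        List.foldl_cons, List.foldl_nil]
    show pvStepB xs (pvB xs M) (1 + (M : Int)) = _
    unfold pvStepB
    rw [show (1 : Int) + (M : Int) - 1 = ((M : Nat) : Int) by omega]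
    rw [show (1 : Int) + (M : Int) = ((M + 1 : Nat) : Int) by push_cast; ring]
    rw [PySem.List.pyGetD_natCast, PySem.List.pyGetD_natCast]
    rfl

-- the single-pass invariant: B's state tracks pvV / pvLs, and A's partial best equals
-- B's best updated with the candidate valley currently open
lemma pvInv (xs : List Int) : ∀ m, m + 1 ≤ xs.length →
    (pvB xs m).2.2.1 = ((pvV xs m : Nat) : Int) ∧
    (pvB xs m).2.2.2 = ((pvLs xs m : Nat) : Int) ∧
    pvA xs (m + 1) =
      pvUpd ((pvB xs m).1, (pvB xs m).2.1, (pvB xs m).2.1 - (pvB xs m).1 + 1)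
        ((pvV xs m : Nat) : Int) ((pvCl xs m : Nat) : Int) := by
  intro m
  induction m with
  | zero =>
    intro _
    refine ⟨rfl, rfl, ?_⟩
    rw [pvA_succ]
    norm_num [pvA, pvB, pvLs, pvV]
  | succ m ih =>
    intro hm
    obtain ⟨hv, hs, ha⟩ := ih (by omega)
    have hBsucc : pvB xs (m + 1) = pvBstep xs m (pvB xs m) := rfl
    rcases hBm : pvB xs m with ⟨b1, b2, bv, bs⟩
    rw [hBm] at hv hs ha hBsucc
    dsimp only at hv hs ha
    subst hv
    subst hs
    rcases lt_trichotomy (xs.getD m 0) (xs.getD (m + 1) 0) with hlt | heq | hgt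
    · -- rise
      have hls : pvLs xs (m + 1) = m + 1 := by
        rw [pvLs_succ, if_neg (by omega)]
      have hvv : pvV xs (m + 1) = pvV xs m := by
        rw [pvV_succ, if_neg (by omega)]
      have hcl : pvCl xs m = pvCl xs (m + 1) := by
        rw [pvCl_step xs m (by omega), if_pos (by omega)]
      have hB : pvBstep xs m (b1, b2, ((pvV xs m : Nat) : Int), ((pvLs xs m : Nat) : Int)) =
          (b1, b2, ((pvV xs m : Nat) : Int), ((m + 1 : Nat) : Int)) := by
        unfold pvBstep
        rw [if_neg (by omega), if_pos hlt]
      rw [hBsucc, hB]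
      refine ⟨by rw [hvv], by rw [hls], ?_⟩
      dsimp only
      rw [pvA_succ, ha, hls, hvv, ← hcl]
      exact pvUpd_absorb _ _ _ _ (by
        have h1 := pvV_le xs m
        push_cast
        omega)
    · -- plateau
      have hls : pvLs xs (m + 1) = pvLs xs m := by
        rw [pvLs_succ, if_pos (by omega)]
      have hvv : pvV xs (m + 1) = pvV xs m := by
        rw [pvV_succ, if_neg (by omega)]
      have hcl : pvCl xs m = pvCl xs (m + 1) := by
        rw [pvCl_step xs m (by omega), if_pos (by omega)]
      have hB : pvBstep xs m (b1, b2, ((pvV xs m : Nat) : Int), ((pvLs xs m : Nat) : Int)) =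
          (b1, b2, ((pvV xs m : Nat) : Int), ((pvLs xs m : Nat) : Int)) := by
        unfold pvBstep
        rw [if_neg (by omega), if_neg (by omega)]
      rw [hBsucc, hB]
      refine ⟨by rw [hvv], by rw [hls], ?_⟩
      dsimp only
      rw [pvA_succ, ha, hls, hvv, ← hcl]
      exact pvUpd_absorb _ _ _ _ (by exact_mod_cast pvV_le_pvLs xs m)
    · -- strict drop: the open valley closes at m
      have hls : pvLs xs (m + 1) = pvLs xs m := by
        rw [pvLs_succ, if_pos (by omega)]
      have hvv : pvV xs (m + 1) = pvLs xs m := by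
        rw [pvV_succ, if_pos hgt]
      have hcl : pvCl xs m = m := by
        rw [pvCl_step xs m (by omega), if_neg (by omega)]
      have hB : pvBstep xs m (b1, b2, ((pvV xs m : Nat) : Int), ((pvLs xs m : Nat) : Int)) =
          ((pvBB ((m : Nat) : Int) (b1, b2, ((pvV xs m : Nat) : Int), ((pvLs xs m : Nat) : Int))).1,
           (pvBB ((m : Nat) : Int) (b1, b2, ((pvV xs m : Nat) : Int), ((pvLs xs m : Nat) : Int))).2,
           ((pvLs xs m : Nat) : Int), ((pvLs xs m : Nat) : Int)) := by
        unfold pvBstep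
        rw [if_pos hgt]
      rw [hBsucc, hB]
      refine ⟨by rw [hvv], by rw [hls], ?_⟩
      dsimp only
      rw [pvA_succ, ha, hls, hvv, hcl]
      congr 1
      exact pvUpd_pvBB (b1, b2, ((pvV xs m : Nat) : Int), ((pvLs xs m : Nat) : Int)) ((m : Nat) : Int)

-- port A computes pvA
lemma pvA_port (xs : List Int) (h0 : xs.length ≠ 0) :
    widest_valley xs =
      PySem.List.slice xs (some (pvA xs xs.length).1) (some ((pvA xs xs.length).2.1 + 1)) := by
  unfold widest_valley
  simp only [PySem.List.len_eq, Int.toNat_natCast]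
  rw [if_neg (by exact_mod_cast h0)]
  rw [show (fun (ls : List Int) (i : Int) =>
        PySem.List.pySetD ls i
          (if PySem.List.pyGetD xs (i - 1) 0 ≥ PySem.List.pyGetD xs i 0 then
            PySem.List.pyGetD ls (i - 1) 0
           else i)) = pvStepA xs from rfl]
  rw [show (fun (re : List Int) (i : Int) =>
        PySem.List.pySetD re i
          (if PySem.List.pyGetD xs i 0 ≤ PySem.List.pyGetD xs (i + 1) 0 then
            PySem.List.pyGetD re (i + 1) 0
           else i)) = pvStepR xs from rfl]
  obtain ⟨hLlen, hLget⟩ := pvLS_inv xs xs.length (le_refl _)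
  -- the right_end table
  have hRE : ∀ p, p < xs.length →
      (List.foldl (pvStepR xs)
        (PySem.List.pySetD (List.replicate xs.length 0) ((xs.length : Int) - 1) ((xs.length : Int) - 1))
        (PySem.List.pyRange ((xs.length : Int) - 2) (-1) (-1))).getD p 0 = ((pvCl xs p : Nat) : Int) := by
    have hcast1 : ((xs.length : Int) - 1) = ((xs.length - 1 : Nat) : Int) := by omega
    rw [hcast1, PySem.List.pySetD_natCast]
    rcases Nat.lt_or_ge xs.length 2 with h1 | h2
    · -- length = 1
      have hlen1 : xs.length = 1 := by omega
      rw [show ((xs.length : Int) - 2) = (-1 : Int) by omega,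
          PySem.List.pyRange_neg_one_eq_nil (by norm_num), List.foldl_nil]
      intro p hp
      have hp0 : p = 0 := by omega
      subst hp0
      rw [hlen1] at *
      rw [show (1 - 1 : Nat) = 0 from rfl]
      rw [pvGetD_set_self _ _ _ (by simp)]
      rw [pvCl_last xs 0 (by omega)]
    · rw [show ((xs.length : Int) - 2) = ((xs.length - 2 : Nat) : Int) by omega]
      refine (pvRE_inv xs (xs.length - 2) _ (by omega) (by simp) ?_).2
      intro p hpj hpn
      have hpe : p = xs.length - 1 := by omega
      subst hpe
      rw [pvGetD_set_self _ _ _ (by simp; omega)]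
      rw [pvCl_last xs (xs.length - 1) (by omega)]
  -- the selection loop
  rw [PySem.List.pyRange_zero_nat xs.length, List.foldl_map]
  rw [PySem.List.foldl_congr_mem (List.range xs.length) _
        (fun b p => pvUpd b ((pvLs xs p : Nat) : Int) ((pvCl xs p : Nat) : Int)) (0, 0, 1) ?_]
  · rfl
  · intro acc p hp
    have hpn : p < xs.length := List.mem_range.mp hp
    dsimp only
    rw [PySem.List.pyGetD_natCast, PySem.List.pyGetD_natCast, hLget p hpn, hRE p hpn]
    rfl

-- port B computes pvB plus the final closing update
lemma pvB_port (xs : List Int) (h0 : xs.length ≠ 0) :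
    widest_valley_alt xs =
      PySem.List.slice xs
        (some (pvBB ((xs.length : Int) - 1) (pvB xs (xs.length - 1))).1)
        (some ((pvBB ((xs.length : Int) - 1) (pvB xs (xs.length - 1))).2 + 1)) := by
  unfold widest_valley_alt
  simp only [PySem.List.len_eq]
  rw [if_neg (by exact_mod_cast h0)]
  rw [show (fun (s : Int × Int × Int × Int) (i : Int) =>
        if PySem.List.pyGetD xs (i - 1) 0 > PySem.List.pyGetD xs i 0 then
          let bb : Int × Int :=
            if (i - 1) - s.2.2.1 > s.2.1 - s.1 ∨ ((i - 1) - s.2.2.1 = s.2.1 - s.1 ∧ s.2.2.1 < s.1)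
            then (s.2.2.1, i - 1) else (s.1, s.2.1)
          (bb.1, bb.2, s.2.2.2, s.2.2.2)
        else if PySem.List.pyGetD xs (i - 1) 0 < PySem.List.pyGetD xs i 0 then
          (s.1, s.2.1, s.2.2.1, i)
        else s) = pvStepB xs from rfl]
  rw [PySem.List.pyRange_one]
  rw [show ((xs.length : Int) - 1).toNat = xs.length - 1 by omega]
  rw [pvB_bridge xs (xs.length - 1)]
  rfl

-- ===== VERDICT (by name: the statement is the Claim_ definition above) =====
theorem widest_valley_spec : Claim_equal_widest_valley := by
  unfold Claim_equal_widest_valley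
  intro profile _
  unfold Spec_widest_valley
  by_cases h0 : profile.length = 0
  · unfold widest_valley widest_valley_alt
    simp [PySem.List.len_eq, h0]
  · rw [pvA_port profile h0, pvB_port profile h0]
    obtain ⟨hv, hs, ha⟩ := pvInv profile (profile.length - 1) (by omega)
    rw [show profile.length - 1 + 1 = profile.length by omega] at ha
    have hcl : pvCl profile (profile.length - 1) = profile.length - 1 :=
      pvCl_last _ _ (by omega)
    rw [hcl] at ha
    rcases hBm : pvB profile (profile.length - 1) with ⟨b1, b2, bv, bs⟩
    rw [hBm] at hv hs ha
    dsimp only at hv hs ha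
    subst hv
    subst hs
    have hfin : pvA profile profile.length =
        ((pvBB ((profile.length - 1 : Nat) : Int)
            (b1, b2, ((pvV profile (profile.length - 1) : Nat) : Int),
             ((pvLs profile (profile.length - 1) : Nat) : Int))).1,
         (pvBB ((profile.length - 1 : Nat) : Int)
            (b1, b2, ((pvV profile (profile.length - 1) : Nat) : Int),
             ((pvLs profile (profile.length - 1) : Nat) : Int))).2,
         (pvBB ((profile.length - 1 : Nat) : Int)
            (b1, b2, ((pvV profile (profile.length - 1) : Nat) : Int),
             ((pvLs profile (profile.length - 1) : Nat) : Int))).2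
           - (pvBB ((profile.length - 1 : Nat) : Int)
            (b1, b2, ((pvV profile (profile.length - 1) : Nat) : Int),
             ((pvLs profile (profile.length - 1) : Nat) : Int))).1 + 1) := by
      rw [ha]
      exact pvUpd_pvBB
        (b1, b2, ((pvV profile (profile.length - 1) : Nat) : Int),
         ((pvLs profile (profile.length - 1) : Nat) : Int))
        ((profile.length - 1 : Nat) : Int)
    rw [show ((profile.length : Int) - 1) = ((profile.length - 1 : Nat) : Int) by omega]
    rw [hfin]
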